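-- pv_equiv track=rewrite | github.com/ConstantHealth/agent-evaluation | samples/hooks/return_control_handler.py | _format_flight_response
-- ===== SOURCE A (Python) =====
-- from typing import Dict, Any, Optional
--
-- def _format_flight_response(api_input: Dict[str, Any]) -> str:
--     """Format a response for flight booking returnControl."""
--     parameters = api_input.get("parameters", [])
--     response_parts = []
--
--     for param in parameters:
--         param_name = param.get("name", "")
--         param_value = param.get("value", "")
--
--         if "destination" in param_name.lower():
--             response_parts.append(f"Destination: New York")
--         elif "date" in param_name.lower():
--             response_parts.append(f"Date: 2024-03-15")
--         elif "passengers" in param_name.lower():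
--             response_parts.append(f"Passengers: 1")
--         elif "class" in param_name.lower():
--             response_parts.append(f"Class: economy")
--         else:
--             response_parts.append(f"{param_name}: {param_value}")
--
--     return "Here are the flight details: " + ", ".join(response_parts)
-- ===== SOURCE B (Python) =====
-- _TABLE = (
--     ("destination", "Destination: New York"),
--     ("date", "Date: 2024-03-15"),
--     ("passengers", "Passengers: 1"),
--     ("class", "Class: economy"),
-- )
--
-- def _part(param):
--     name = param.get("name", "")
--     low = name.lower()
--     for kw, resp in _TABLE:
--         if kw in low:
--             return resp
--     return f"{name}: {param.get('value', '')}"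
--
-- def _render(params):
--     # structural recursion: builds the joined string directly, no parts list
--     if not params:
--         return ""
--     if len(params) == 1:
--         return _part(params[0])
--     return _part(params[0]) + ", " + _render(params[1:])
--
-- def _format_flight_response(api_input):
--     """Format a response for flight booking returnControl."""
--     return "Here are the flight details: " + _render(api_input.get("parameters", []))
-- ===== Notes on version B (the rewrite author's own statement) =====
-- stated objective: alternative
-- what changed: Instead of accumulating a list of parts via an append loop with a hard-coded elif chain and then joining, B recursively builds the final string directly head-to-tail, inlining the ', ' separator logic and resolving each parameter by a first-match scan of a keyword->response table.
import Mathlib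
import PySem

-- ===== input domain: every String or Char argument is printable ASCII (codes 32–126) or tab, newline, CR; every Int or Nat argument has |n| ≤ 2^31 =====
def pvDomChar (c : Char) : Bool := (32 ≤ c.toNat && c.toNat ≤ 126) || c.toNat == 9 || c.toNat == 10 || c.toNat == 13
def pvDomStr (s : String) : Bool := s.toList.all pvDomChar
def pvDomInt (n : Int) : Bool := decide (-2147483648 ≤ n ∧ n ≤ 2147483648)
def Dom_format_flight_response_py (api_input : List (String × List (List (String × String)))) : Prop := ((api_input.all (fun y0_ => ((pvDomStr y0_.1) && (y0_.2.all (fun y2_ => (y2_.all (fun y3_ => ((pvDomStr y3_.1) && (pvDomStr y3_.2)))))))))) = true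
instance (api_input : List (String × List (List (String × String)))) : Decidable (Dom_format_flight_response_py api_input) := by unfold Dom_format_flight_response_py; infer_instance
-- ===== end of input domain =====

-- B builds the final string directly by structural recursion with inlined ", " separators
-- (no parts list, no join), resolving each parameter by a first-match keyword table (alternative).

-- ===== PORT A =====
def format_flight_response_py (api_input : List (String × List (List (String × String)))) : String :=
  let parameters := (PySem.Dict.mk api_input).getD "parameters" []
  let response_parts := parameters.foldl (fun acc param =>
    let param_name := (PySem.Dict.mk param).getD "name" ""
    let param_value := (PySem.Dict.mk param).getD "value" ""
    acc ++ [
      if PySem.Str.isIn "destination" (PySem.Str.lower param_name) then "Destination: New York"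
      else if PySem.Str.isIn "date" (PySem.Str.lower param_name) then "Date: 2024-03-15"
      else if PySem.Str.isIn "passengers" (PySem.Str.lower param_name) then "Passengers: 1"
      else if PySem.Str.isIn "class" (PySem.Str.lower param_name) then "Class: economy"
      else param_name ++ ": " ++ param_value]) []
  "Here are the flight details: " ++ PySem.Str.join ", " response_parts

-- ===== PORT B =====
def pvTable : List (String × String) :=
  [("destination", "Destination: New York"),
   ("date", "Date: 2024-03-15"),
   ("passengers", "Passengers: 1"),
   ("class", "Class: economy")]

def pvPart (param : List (String × String)) : String :=
  let name := (PySem.Dict.mk param).getD "name" ""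
  let low := PySem.Str.lower name
  match pvTable.find? (fun kv => PySem.Str.isIn kv.1 low) with
  | some kv => kv.2
  | none => name ++ ": " ++ (PySem.Dict.mk param).getD "value" ""

def pvRender : List (List (String × String)) → String
  | [] => ""
  | [p] => pvPart p
  | p :: q :: rest => pvPart p ++ ", " ++ pvRender (q :: rest)

def format_flight_response_py_alt (api_input : List (String × List (List (String × String)))) : String :=
  "Here are the flight details: " ++ pvRender ((PySem.Dict.mk api_input).getD "parameters" [])

-- ===== PRECONDITION & SPEC =====
def Spec_format_flight_response_py (api_input : List (String × List (List (String × String)))) (out : String) : Prop := out = format_flight_response_py_alt api_input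
instance (api_input : List (String × List (List (String × String)))) (out : String) : Decidable (Spec_format_flight_response_py api_input out) := by unfold Spec_format_flight_response_py; infer_instance

-- ===== CLAIM =====
def Claim_equal_format_flight_response_py : Prop := ∀ (api_input : List (String × List (List (String × String)))), Dom_format_flight_response_py api_input → Spec_format_flight_response_py api_input (format_flight_response_py api_input)

-- ===== LEMMAS AND PROOFS =====

-- A's elif chain on one parameter equals B's first-match table scan.
theorem pvBranch_eq_part (param : List (String × String)) :
    (let param_name := (PySem.Dict.mk param).getD "name" ""
     let param_value := (PySem.Dict.mk param).getD "value" ""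
     if PySem.Str.isIn "destination" (PySem.Str.lower param_name) then "Destination: New York"
     else if PySem.Str.isIn "date" (PySem.Str.lower param_name) then "Date: 2024-03-15"
     else if PySem.Str.isIn "passengers" (PySem.Str.lower param_name) then "Passengers: 1"
     else if PySem.Str.isIn "class" (PySem.Str.lower param_name) then "Class: economy"
     else param_name ++ ": " ++ param_value) = pvPart param := by
  simp only [pvPart, pvTable, List.find?, PySem.Str.isIn]
  split_ifs with h1 h2 h3 h4 <;> simp_all

-- joining the mapped parts equals B's direct recursive rendering
theorem pvJoin_map_eq_render (l : List (List (String × String))) :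
    PySem.Str.join ", " (l.map pvPart) = pvRender l := by
  induction l with
  | nil => simp [pvRender, PySem.Str.join, PySem.Chars.join, List.intercalate]
  | cons p rest ih =>
    cases rest with
    | nil => simp [pvRender, PySem.Str.join, PySem.Chars.join, List.intercalate]
    | cons q rs =>
      rw [pvRender, ← ih]
      simp only [PySem.Str.join, PySem.Chars.join_cons_cons, List.map]
      rw [← String.toList_inj]
      simp

theorem format_flight_response_py_spec : Claim_equal_format_flight_response_py := by
  intro api_input _
  show _ = _
  simp only [format_flight_response_py, format_flight_response_py_alt]
  congr 1
  rw [PySem.List.foldl_append_singleton_eq_map]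
  rw [List.map_congr_left (fun param _ => pvBranch_eq_part param)]
  exact pvJoin_map_eq_render _
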